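-- pv_equiv track=rewrite | github.com/DianaS123/RAC2 | Datoteke/Vaje1/zabica.py | zabica
-- ===== SOURCE A (Python) =====
-- from functools import lru_cache
--
-- def zabica(mocvara):
--     n = len(mocvara)
--     @lru_cache(maxsize=None)
--     def pomozna(i, e):
--         """
--             Žabica na i-tem lokvanju z trenutno energijo e.
--         """
--         if i+e >= n:
--             # žabica je izven jezera
--             return 0
--         else:
--             # energija se poveča za toliko, kolikor poje muh na novem lokvanju
--             nova_energija = e + mocvara[i]
--             return 1 + min(pomozna(i+k, nova_energija - k) for k in range(1, nova_energija + 1))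
--     # žabica začne na prvem lokvanju z energijo 0
--     return pomozna(0, 0)
-- ===== SOURCE B (Python) =====
-- def zabica(mocvara):
--     """Level-by-level BFS over jump counts: for each lily keep the best (max)
--     reachable energy-sum in t jumps; one prefix-max pass per level."""
--     n = len(mocvara)
--     if n == 0:
--         return 0
--     cur = [None] * n        # cur[j] = max of (j + energy) over states reachable at lily j in t jumps
--     cur[0] = 0
--     for t in range(1, n + 1):
--         nxt = [None] * n
--         pref = None         # best reach s + mocvara[j] over lilies j already scanned
--         hit = False
--         for j in range(n):
--             if pref is not None and pref >= j:
--                 nxt[j] = pref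
--             if cur[j] is not None:
--                 r = cur[j] + mocvara[j]
--                 if r >= n:
--                     hit = True
--                 elif pref is None or r > pref:
--                     pref = r
--         if hit:
--             return t
--         cur = nxt
--     raise ValueError("zabica: the frog is stuck")
-- ===== Notes on version B (the rewrite author's own statement) =====
-- stated objective: faster
-- what changed: Replaces the top-down recursion over (lily, energy) states whose inner min scans every k in range(1, energy+1) by a level-by-level BFS over jump counts that keeps, per lily, only the best (maximal) reachable energy-sum and computes each next level with a single prefix-max pass, so the work no longer depends on the energy values; Pre_ excludes exactly the inputs on which A raises ValueError (min of an empty range, reached when some jump sequence leaves the frog with non-positive energy inside the lake).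
import Mathlib
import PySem

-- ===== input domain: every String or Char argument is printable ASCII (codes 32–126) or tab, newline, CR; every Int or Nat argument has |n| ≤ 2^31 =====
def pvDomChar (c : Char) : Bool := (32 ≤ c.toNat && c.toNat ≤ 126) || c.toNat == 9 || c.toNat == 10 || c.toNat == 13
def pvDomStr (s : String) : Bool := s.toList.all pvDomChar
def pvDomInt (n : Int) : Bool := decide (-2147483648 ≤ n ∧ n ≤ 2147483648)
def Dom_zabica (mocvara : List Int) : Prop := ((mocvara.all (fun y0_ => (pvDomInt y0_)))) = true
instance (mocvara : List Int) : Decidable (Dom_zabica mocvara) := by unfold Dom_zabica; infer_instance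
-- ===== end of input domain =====

-- B replaces A's top-down recursion over (lily, energy) states (inner min over every k
-- in range(1, energy+1)) by a level-by-level BFS over jump counts keeping one maximal
-- reach per lily, computed with a prefix-max pass; objective: faster (value-independent work).

-- ===== PORT A =====
-- pomozna(i, e) with explicit fuel (a totality guard only: with fuel > n - i the guard
-- is never reached, which is all Pre_zabica admits).  mocvara[i] is pyGetD: every access
-- A performs has 0 ≤ i < n (i+e < n and e ≥ 0 on every reachable state), so it is exact.
def pomozna (m : List Int) (n : Int) : Nat → Int → Int → Int
  | 0, _, _ => 0
  | fuel+1, i, e =>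
    if n ≤ i + e then 0
    else
      let nova := e + PySem.List.pyGetD m i 0
      match ((PySem.List.pyRange 1 (nova+1) 1).map
              (fun k => pomozna m n fuel (i+k) (nova-k))).min? with
      | some v => 1 + v
      | none => 0      -- Python raises ValueError (min of empty); excluded by Pre_zabica

def zabica (mocvara : List Int) : Int :=
  pomozna mocvara (mocvara.length : Int) (mocvara.length + 1) 0 0

-- ===== PORT B =====
-- one pass of B's inner `for j in range(n)` loop: state (nxt-so-far, pref, hit)
def brow (m : List Int) (n : Nat) (cur : List (Option Int)) :
    List (Option Int) × Option Int × Bool :=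
  (List.range n).foldl (fun st (j : Nat) =>
    let entry : Option Int :=
      match st.2.1 with
      | some p => if (j : Int) ≤ p then some p else none
      | none => none
    let st1 : List (Option Int) × Option Int × Bool := (st.1 ++ [entry], st.2.1, st.2.2)
    match cur.getD j none with
    | none => st1
    | some c =>
      let r := c + m.getD j 0
      if (n : Int) ≤ r then (st1.1, st1.2.1, true)
      else
        match st1.2.1 with
        | some p => if p < r then (st1.1, some r, st1.2.2) else st1
        | none => (st1.1, some r, st1.2.2))
    ([], none, false)

-- B's `for t in range(1, n+1)` loop; when the fuel n runs out Python B raises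
-- ValueError ("the frog is stuck"), which happens only outside Pre_zabica
-- (the port returns the dead value t there).
def zloop (m : List Int) (n : Nat) : Nat → Int → List (Option Int) → Int
  | 0, t, _ => t
  | fuel+1, t, cur =>
    let st := brow m n cur
    if st.2.2 then t + 1 else zloop m n fuel (t + 1) st.1

def zabica_alt (mocvara : List Int) : Int :=
  if mocvara.length = 0 then 0
  else zloop mocvara mocvara.length mocvara.length 0
         (some 0 :: List.replicate (mocvara.length - 1) none)

-- ===== PRECONDITION & SPEC =====
-- A jump chain: the strictly increasing list of lilies the frog visits, starting at 0.
-- chainGo m s l walks it carrying the pre-eating sum s = lily + energy and returns true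
-- exactly when the walk reaches a lily still inside the lake whose fly count leaves the
-- frog with non-positive energy (A's `min` over `range(1, nova+1)` is empty there).
def chainGo (m : List Int) (s : Int) : List Nat → Bool
  | [] => false
  | j :: rest =>
    if (m.length : Int) ≤ s then false
    else if s + m.getD j 0 ≤ (j : Int) then true
    else
      match rest with
      | [] => false
      | j' :: _ =>
        if j < j' ∧ (j' : Int) ≤ s + m.getD j 0 then chainGo m (s + m.getD j 0) rest
        else false

def chainBad (m : List Int) (l : List Nat) : Bool :=
  match l with
  | 0 :: _ => chainGo m 0 l
  | _ => false

-- Pre_ excludes exactly the inputs on which A raises ValueError (min() of an empty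
-- range): those where some jump chain from lily 0 leaves the frog with non-positive
-- energy while it is still inside the lake.  On every other input A returns.
def Pre_zabica (mocvara : List Int) : Prop :=
  ∀ l ∈ (List.range mocvara.length).sublists, chainBad mocvara l = false
instance (mocvara : List Int) : Decidable (Pre_zabica mocvara) := by
  unfold Pre_zabica; infer_instance

def pvWitness_zabica : List Int := [2, 1]

def Spec_zabica (mocvara : List Int) (out : Int) : Prop := out = zabica_alt mocvara
instance (mocvara : List Int) (out : Int) : Decidable (Spec_zabica mocvara out) := by
  unfold Spec_zabica; infer_instance

-- ===== CLAIM (what is proved, stated in full; the proofs are below) =====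
def Claim_equal_zabica : Prop := ∀ (mocvara : List Int), Dom_zabica mocvara →
  Pre_zabica mocvara → Spec_zabica mocvara (zabica mocvara)

-- ===== LEMMAS AND PROOFS =====

-- One jump of the frog: from state x = (lily, energy) to state y, exactly A's recursion
-- step (y = (i+k, nova-k) for some 1 ≤ k ≤ nova, nova = x.2 + m[x.1]).
def FStep (m : List Int) (x y : Int × Int) : Prop :=
  x.1 + x.2 < (m.length : Int) ∧ x.1 < y.1 ∧ 0 ≤ y.2 ∧
    y.1 + y.2 = x.1 + x.2 + PySem.List.pyGetD m x.1 0

inductive FPath (m : List Int) : ℕ → (Int × Int) → (Int × Int) → Prop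
  | refl (x : Int × Int) : FPath m 0 x x
  | cons {t : ℕ} {x y z : Int × Int} (h : FStep m x y) (hp : FPath m t y z) : FPath m (t+1) x z

-- the frog escapes from x in exactly t jumps
def Sol (m : List Int) (x : Int × Int) (t : ℕ) : Prop :=
  ∃ y, FPath m t x y ∧ (m.length : Int) ≤ y.1 + y.2

theorem path_snoc {m : List Int} {t : ℕ} {x y z : Int × Int}
    (hp : FPath m t x y) (hs : FStep m y z) : FPath m (t+1) x z := by
  induction hp with
  | refl w => exact FPath.cons hs (FPath.refl z)
  | cons h _ ih => exact FPath.cons h (ih hs)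


theorem path_succ_elim {m : List Int} {t : ℕ} {x z : Int × Int}
    (hp : FPath m (t+1) x z) : ∃ y, FPath m t x y ∧ FStep m y z := by
  induction t generalizing x with
  | zero =>
    cases hp with
    | cons h hp' => cases hp' with | refl _ => exact ⟨x, FPath.refl x, h⟩
  | succ t ih =>
    cases hp with
    | cons h hp' =>
      obtain ⟨y, hy, hs⟩ := ih hp'
      exact ⟨y, FPath.cons h hy, hs⟩


theorem path_nonneg {m : List Int} {t : ℕ} {x y : Int × Int}
    (hx1 : 0 ≤ x.1) (hx2 : 0 ≤ x.2) (hp : FPath m t x y) : 0 ≤ y.1 ∧ 0 ≤ y.2 := by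
  induction hp with
  | refl w => exact ⟨hx1, hx2⟩
  | cons h _ ih => exact ih (by have := h.2.1; omega) h.2.2.1


theorem path_len {m : List Int} {t : ℕ} {x y : Int × Int}
    (hp : FPath m t x y) : x.1 + t ≤ y.1 := by
  induction hp with
  | refl w => simp
  | cons h _ ih =>
    have h1 := h.2.1
    push_cast
    push_cast at ih
    omega


-- ---- Pre_ is exactly "no evaluated state raises": a path to a raising state
-- ---- yields a bad chain ----

theorem sublist_range'_of_pairwise (l : List Nat) :
    ∀ (a len : Nat), l.Pairwise (· < ·) → (∀ x ∈ l, a ≤ x ∧ x < a + len) →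
      l.Sublist (List.range' a len) := by
  induction l with
  | nil => intro a len _ _; exact List.nil_sublist _
  | cons j rest ih =>
    intro a len hp hb
    obtain ⟨hja, hjn⟩ := hb j List.mem_cons_self
    obtain ⟨hlt, hp'⟩ := List.pairwise_cons.mp hp
    have hsplit : List.range' a len
        = List.range' a (j - a) ++ j :: List.range' (j+1) (len - (j - a) - 1) := by
      have h1 : List.range' a (j - a) ++ List.range' (a + 1 * (j - a)) (len - (j - a))
          = List.range' a ((j - a) + (len - (j - a))) := (List.range'_append ..)
      have h2 : a + 1 * (j - a) = j := by omega
      have h4 : (j - a) + (len - (j - a)) = len := by omega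
      have h3 : List.range' j (len - (j - a))
          = j :: List.range' (j+1) (len - (j - a) - 1) := by
        have h5 : len - (j - a) = (len - (j - a) - 1) + 1 := by omega
        rw [h5, List.range'_succ]
        simp
      rw [h2, h4, h3] at h1
      exact h1.symm
    rw [hsplit]
    refine List.Sublist.append (List.nil_sublist _) (List.Sublist.cons₂ j ?_)
    apply ih
    · exact hp'
    · intro x hx
      have := hb x (List.mem_cons_of_mem j hx)
      have := hlt x hx
      omega

theorem sublist_range_of_chain (l : List Nat) (n : Nat)
    (hc : l.IsChain (· < ·)) (hb : ∀ x ∈ l, x < n) : l.Sublist (List.range n) := by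
  rw [List.range_eq_range']
  exact sublist_range'_of_pairwise l 0 n (List.isChain_iff_pairwise.mp hc)
    (fun x hx => ⟨Nat.zero_le x, by simpa using hb x hx⟩)

-- a path from x to a raising state y turns into a chain witnessing chainGo = true
theorem chain_of_raise {m : List Int} :
    ∀ (t : ℕ) (x y : Int × Int), FPath m t x y → 0 ≤ x.1 → 0 ≤ x.2 →
      y.1 + y.2 < (m.length : Int) → y.2 + PySem.List.pyGetD m y.1 0 ≤ 0 →
      ∃ l : List Nat, l.head? = some x.1.toNat ∧ l.IsChain (· < ·) ∧
        (∀ a ∈ l, a < m.length) ∧ chainGo m (x.1 + x.2) l = true := by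
  intro t x y hp
  induction hp with
  | refl w =>
    intro hx1 hx2 hin hraise
    refine ⟨[w.1.toNat], rfl, by simp, by intro a ha; simp at ha; omega, ?_⟩
    have hw : ((w.1.toNat : ℕ) : Int) = w.1 := by omega
    have hget : PySem.List.pyGetD m w.1 0 = m.getD w.1.toNat 0 := by
      rw [← hw]; exact PySem.List.pyGetD_natCast m _ 0
    rw [chainGo]
    rw [if_neg (by omega), if_pos (by rw [← hget, hw]; omega)]
  | cons h hp' ih =>
    rename_i t' x' w z
    intro hx1 hx2 hin hraise
    have hw1 : 0 ≤ w.1 := by have := h.2.1; omega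
    obtain ⟨l, hhead, hchain, hbnd, hgo⟩ := ih hw1 h.2.2.1 hin hraise
    obtain ⟨l', rfl⟩ : ∃ l', l = w.1.toNat :: l' := by
      cases l with
      | nil => simp at hhead
      | cons a l' =>
        simp at hhead
        exact ⟨l', by rw [hhead]⟩
    have hx1' : ((x'.1.toNat : ℕ) : Int) = x'.1 := by omega
    have hget : PySem.List.pyGetD m x'.1 0 = m.getD x'.1.toNat 0 := by
      rw [← hx1']; exact PySem.List.pyGetD_natCast m _ 0
    have hlt : x'.1.toNat < w.1.toNat := by have := h.2.1; omega
    have hsum : x'.1 + x'.2 + m.getD x'.1.toNat 0 = w.1 + w.2 := by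
      rw [← hget]; have := h.2.2.2; omega
    by_cases hr : x'.1 + x'.2 + m.getD x'.1.toNat 0 ≤ x'.1
    · refine ⟨[x'.1.toNat], rfl, by simp, by intro a ha; simp at ha; have := h.1; omega, ?_⟩
      rw [chainGo]
      rw [if_neg (by have := h.1; omega), if_pos (by rw [hx1']; omega)]
    · refine ⟨x'.1.toNat :: w.1.toNat :: l', rfl, ?_, ?_, ?_⟩
      · exact List.isChain_cons_cons.mpr ⟨hlt, hchain⟩
      · intro a ha
        rcases List.mem_cons.mp ha with rfl | ha'
        · have := h.1; omega
        · exact hbnd a ha'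
      · rw [chainGo]
        rw [if_neg (by have := h.1; omega), if_neg (by rw [hx1']; omega)]
        have hcond : x'.1.toNat < w.1.toNat ∧
            ((w.1.toNat : ℕ) : Int) ≤ x'.1 + x'.2 + m.getD x'.1.toNat 0 := by
          constructor
          · exact hlt
          · have hwc : ((w.1.toNat : ℕ) : Int) = w.1 := by omega
            rw [hwc, hsum]; have := h.2.2.1; omega
        rw [if_pos hcond, hsum]
        exact hgo

-- under Pre_, no reachable in-lake state leaves the frog with non-positive energy
theorem safe_of_pre {m : List Int} (hpre : Pre_zabica m) {t : ℕ} {i e : Int}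
    (_hi : 0 ≤ i) (_he : 0 ≤ e) (hp : FPath m t (0, 0) (i, e))
    (hin : i + e < (m.length : Int)) : 1 ≤ e + PySem.List.pyGetD m i 0 := by
  by_contra hle
  obtain ⟨l, hhead, hchain, hbnd, hgo⟩ :=
    chain_of_raise t ((0 : Int), (0 : Int)) (i, e) hp (by simp) (by simp)
      hin (by show e + PySem.List.pyGetD m i 0 ≤ 0; omega)
  obtain ⟨l', rfl⟩ : ∃ l', l = 0 :: l' := by
    cases l with
    | nil => simp at hhead
    | cons a l' =>
      have ha : a = 0 := by simpa using hhead
      exact ⟨l', by rw [ha]⟩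
  have hmem : (0 :: l').Sublist (List.range m.length) :=
    sublist_range_of_chain _ _ hchain hbnd
  have hfalse := hpre (0 :: l') (List.mem_sublists.mpr hmem)
  have hgo' : chainGo m 0 (0 :: l') = true := by
    have : ((0 : Int), (0 : Int)).1 + ((0 : Int), (0 : Int)).2 = 0 := by norm_num
    rwa [this] at hgo
  rw [chainBad] at hfalse
  simp only [hgo'] at hfalse
  exact Bool.noConfusion hfalse

-- A's helper computes exactly the least number of jumps to escape, on every state
-- reachable from (0, 0) (Pre_ guarantees the inner min is never empty there).
theorem pomozna_spec (m : List Int) (hpre : Pre_zabica m) :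
    ∀ (fuel : ℕ) (i e : Int), 0 ≤ i → 0 ≤ e →
      (∃ t0 : ℕ, FPath m t0 (0, 0) (i, e)) →
      (((m.length : Int) - i).toNat < fuel) →
      0 ≤ pomozna m (m.length : Int) fuel i e ∧
      Sol m (i, e) (pomozna m (m.length : Int) fuel i e).toNat ∧
      (∀ t : ℕ, Sol m (i, e) t → pomozna m (m.length : Int) fuel i e ≤ (t : Int)) := by
  intro fuel
  induction fuel with
  | zero => intro i e _ _ _ hf; omega
  | succ fuel ih =>
    intro i e hi he hreach hf
    obtain ⟨t0, hp0⟩ := hreach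
    rw [pomozna]
    by_cases hesc : (m.length : Int) ≤ i + e
    · simp only [hesc, if_true]
      refine ⟨le_refl 0, ⟨(i, e), FPath.refl _, hesc⟩, fun t _ => by positivity⟩
    · simp only [hesc, if_false]
      have hiN : i < (m.length : Int) := by omega
      have hnova1 : 1 ≤ e + PySem.List.pyGetD m i 0 :=
        safe_of_pre hpre hi he hp0 (by omega)
      set nova := e + PySem.List.pyGetD m i 0 with hnova
      set f : Int → Int := fun k => pomozna m (m.length : Int) fuel (i+k) (nova-k) with hfdef
      set L := (PySem.List.pyRange 1 (nova+1) 1).map f with hL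
      have hLne : L ≠ [] := by
        have h1 : f 1 ∈ L :=
          List.mem_map_of_mem (by rw [PySem.List.mem_pyRange_one]; omega)
        exact List.ne_nil_of_mem h1
      obtain ⟨v, hv⟩ := Option.isSome_iff_exists.mp (List.isSome_min?_of_ne_nil hLne)
      rw [hv]
      dsimp only
      have hvspec := List.min?_eq_some_iff_subtype.mp hv
      obtain ⟨k0, hk0mem, hk0⟩ := List.mem_map.mp hvspec.1
      rw [PySem.List.mem_pyRange_one] at hk0mem
      have hstep : ∀ k : Int, 1 ≤ k → k ≤ nova → FStep m (i, e) (i+k, nova-k) := by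
        intro k hk1 hk2
        exact ⟨by simpa using hesc, by simp; omega, by simp; omega, by simp; omega⟩
      -- the child invariants for any 1 ≤ k ≤ nova
      have hchild : ∀ k : Int, 1 ≤ k → k ≤ nova →
          0 ≤ f k ∧ Sol m (i+k, nova-k) (f k).toNat ∧
          (∀ t : ℕ, Sol m (i+k, nova-k) t → f k ≤ (t : Int)) := by
        intro k hk1 hk2
        exact ih (i+k) (nova-k) (by omega) (by omega)
          ⟨t0 + 1, path_snoc hp0 (hstep k hk1 hk2)⟩ (by omega)
      obtain ⟨hv0, ⟨y, hy, hyesc⟩, hlow⟩ := hchild k0 (by omega) (by omega)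
      rw [hk0] at hv0 hy hlow
      refine ⟨by omega, ?_, ?_⟩
      · -- achievability
        have : (1 + v).toNat = v.toNat + 1 := by omega
        rw [this]
        exact ⟨y, FPath.cons (hstep k0 (by omega) (by omega)) hy, hyesc⟩
      · -- lower bound
        intro t ⟨z, hz, hzesc⟩
        match t, hz with
        | 0, FPath.refl _ => exact absurd hzesc (by simpa using hesc)
        | t'+1, FPath.cons (y := w) hs hp =>
          have h1 := hs.1
          have h2 := hs.2.1
          have h3 := hs.2.2.1
          have h4 := hs.2.2.2
          simp only at h1 h2 h3 h4
          set k := w.1 - i with hk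
          have hw : w = (i + k, nova - k) := by
            apply Prod.ext <;> simp <;> omega
          have hfk : f k ∈ L := by
            rw [hL]
            exact List.mem_map_of_mem (by rw [PySem.List.mem_pyRange_one]; omega)
          have hmin := hvspec.2 _ hfk
          have hlowk := (hchild k (by omega) (by omega)).2.2 t' ⟨z, by rwa [hw] at hp, hzesc⟩
          push_cast
          omega


-- ---- B-side: computable descriptions of the three components of brow ----

-- o is (some of) the maximum of the set S, or none when S is empty
def IsMaxOpt (S : Int → Prop) : Option Int → Prop
  | none => ∀ w, ¬ S w
  | some v => S v ∧ ∀ w, S w → w ≤ v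

-- candidate reaches feeding nxt[j'] : value c + m[j] from a filled cur[j], j < p, not escaping
def RowS (m : List Int) (n : Nat) (cur : List (Option Int)) (p : Nat) (v : Int) : Prop :=
  ∃ j < p, ∃ c, cur.getD j none = some c ∧ v = c + m.getD j 0 ∧ v < (n : Int)

def prefFn (m : List Int) (n : Nat) (cur : List (Option Int)) (p : Nat) : Option Int :=
  (List.range p).foldl (fun pref j =>
    match cur.getD j none with
    | none => pref
    | some c =>
      let r := c + m.getD j 0
      if (n : Int) ≤ r then pref
      else
        match pref with
        | some q => if q < r then some r else pref
        | none => some r) none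

def entryFn (m : List Int) (n : Nat) (cur : List (Option Int)) (j : Nat) : Option Int :=
  match prefFn m n cur j with
  | some p => if (j : Int) ≤ p then some p else none
  | none => none

def hitFn (m : List Int) (n : Nat) (cur : List (Option Int)) (p : Nat) : Bool :=
  (List.range p).any (fun j =>
    match cur.getD j none with
    | some c => (n : Int) ≤ c + m.getD j 0
    | none => false)

theorem prefFn_succ (m : List Int) (n : Nat) (cur : List (Option Int)) (p : Nat) :
    prefFn m n cur (p+1) =
      (match cur.getD p none with
      | none => prefFn m n cur p
      | some c =>
        let r := c + m.getD p 0
        if (n : Int) ≤ r then prefFn m n cur p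
        else
          match prefFn m n cur p with
          | some q => if q < r then some r else prefFn m n cur p
          | none => some r) := by
  simp only [prefFn, List.range_succ, List.foldl_append, List.foldl_cons, List.foldl_nil]

theorem hitFn_succ (m : List Int) (n : Nat) (cur : List (Option Int)) (p : Nat) :
    hitFn m n cur (p+1) =
      (hitFn m n cur p ||
        (match cur.getD p none with
        | some c => decide ((n : Int) ≤ c + m.getD p 0)
        | none => false)) := by
  simp only [hitFn, List.range_succ, List.any_append, List.any_cons, List.any_nil, Bool.or_false]

theorem brow_eq (m : List Int) (n : Nat) (cur : List (Option Int)) :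
    brow m n cur = ((List.range n).map (entryFn m n cur), prefFn m n cur n, hitFn m n cur n) := by
  suffices h : ∀ p : Nat,
      (List.range p).foldl (fun st (j : Nat) =>
        let entry : Option Int :=
          match st.2.1 with
          | some p => if (j : Int) ≤ p then some p else none
          | none => none
        let st1 : List (Option Int) × Option Int × Bool := (st.1 ++ [entry], st.2.1, st.2.2)
        match cur.getD j none with
        | none => st1
        | some c =>
          let r := c + m.getD j 0
          if (n : Int) ≤ r then (st1.1, st1.2.1, true)
          else
            match st1.2.1 with
            | some p => if p < r then (st1.1, some r, st1.2.2) else st1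
            | none => (st1.1, some r, st1.2.2))
        ([], none, false) =
      ((List.range p).map (entryFn m n cur), prefFn m n cur p, hitFn m n cur p) by
    exact h n
  intro p
  induction p with
  | zero => rfl
  | succ p ih =>
    rw [List.range_succ, List.foldl_append, List.map_append, ih]
    simp only [List.foldl_cons, List.foldl_nil, prefFn_succ, hitFn_succ]
    have hentry : entryFn m n cur p =
        (match prefFn m n cur p with
        | some q => if (p : Int) ≤ q then some q else none
        | none => none) := rfl
    cases hc : cur.getD p none with
    | none => simp [hentry]
    | some c =>
      by_cases hr : (n : Int) ≤ c + m.getD p 0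
      · have hr' := hr; simp only [List.getD_eq_getElem?_getD] at hr'
        simp [hentry, hr']
      · have hr' := hr; simp only [List.getD_eq_getElem?_getD] at hr'
        cases hq : prefFn m n cur p with
        | none => simp [hentry, hr', hq]
        | some q =>
          by_cases hqr : q < c + m.getD p 0 <;>
            [skip; skip] <;>
            · have hqr' := hqr; simp only [List.getD_eq_getElem?_getD] at hqr'
              simp [hentry, hr', hq, hqr']

theorem hitFn_iff (m : List Int) (n : Nat) (cur : List (Option Int)) (p : Nat) :
    hitFn m n cur p = true ↔
      ∃ j < p, ∃ c, cur.getD j none = some c ∧ (n : Int) ≤ c + m.getD j 0 := by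
  rw [hitFn, List.any_eq_true]
  constructor
  · rintro ⟨j, hj, hb⟩
    rw [List.mem_range] at hj
    cases hc : cur.getD j none with
    | none => rw [hc] at hb; simp at hb
    | some c =>
      rw [hc] at hb
      exact ⟨j, hj, c, hc, by simpa using hb⟩
  · rintro ⟨j, hj, c, hc, hle⟩
    exact ⟨j, List.mem_range.mpr hj, by rw [hc]; simpa using hle⟩

theorem RowS_succ (m : List Int) (n : Nat) (cur : List (Option Int)) (p : Nat) (v : Int) :
    RowS m n cur (p+1) v ↔
      RowS m n cur p v ∨
        (∃ c, cur.getD p none = some c ∧ v = c + m.getD p 0 ∧ v < (n : Int)) := by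
  constructor
  · rintro ⟨j, hj, c, hc, hv, hlt⟩
    rcases Nat.lt_succ_iff_lt_or_eq.mp hj with h | rfl
    · exact Or.inl ⟨j, h, c, hc, hv, hlt⟩
    · exact Or.inr ⟨c, hc, hv, hlt⟩
  · rintro (⟨j, hj, c, hc, hv, hlt⟩ | ⟨c, hc, hv, hlt⟩)
    · exact ⟨j, Nat.lt_succ_of_lt hj, c, hc, hv, hlt⟩
    · exact ⟨p, Nat.lt_succ_self p, c, hc, hv, hlt⟩

theorem prefFn_spec (m : List Int) (n : Nat) (cur : List (Option Int)) (p : Nat) :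
    IsMaxOpt (RowS m n cur p) (prefFn m n cur p) := by
  induction p with
  | zero =>
    have : prefFn m n cur 0 = none := rfl
    rw [this]
    rintro w ⟨j, hj, _⟩
    omega
  | succ p ih =>
    rw [prefFn_succ]
    cases hc : cur.getD p none with
    | none =>
      cases hq : prefFn m n cur p with
      | none =>
        rw [hq] at ih
        intro w hw
        rcases (RowS_succ m n cur p w).mp hw with h | ⟨c, hc', _⟩
        · exact ih w h
        · rw [hc] at hc'; simp at hc'
      | some q =>
        rw [hq] at ih
        refine ⟨(RowS_succ m n cur p q).mpr (Or.inl ih.1), ?_⟩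
        intro w hw
        rcases (RowS_succ m n cur p w).mp hw with h | ⟨c, hc', _⟩
        · exact ih.2 w h
        · rw [hc] at hc'; simp at hc'
    | some c =>
      by_cases hr : (n : Int) ≤ c + m.getD p 0
      · simp only [hr, if_true]
        cases hq : prefFn m n cur p with
        | none =>
          rw [hq] at ih
          intro w hw
          rcases (RowS_succ m n cur p w).mp hw with h | ⟨c', hc', hv, hlt⟩
          · exact ih w h
          · rw [hc] at hc'; injection hc' with h'; omega
        | some q =>
          rw [hq] at ih
          refine ⟨(RowS_succ m n cur p q).mpr (Or.inl ih.1), ?_⟩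
          intro w hw
          rcases (RowS_succ m n cur p w).mp hw with h | ⟨c', hc', hv, hlt⟩
          · exact ih.2 w h
          · rw [hc] at hc'; injection hc' with h'; omega
      · simp only [hr, if_false]
        have hnew : RowS m n cur (p+1) (c + m.getD p 0) :=
          (RowS_succ m n cur p _).mpr (Or.inr ⟨c, hc, rfl, by omega⟩)
        cases hq : prefFn m n cur p with
        | none =>
          rw [hq] at ih
          refine ⟨hnew, ?_⟩
          intro w hw
          rcases (RowS_succ m n cur p w).mp hw with h | ⟨c', hc', hv, hlt⟩
          · exact absurd h (ih w)
          · rw [hc] at hc'; injection hc' with h'; omega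
        | some q =>
          rw [hq] at ih
          by_cases hqr : q < c + m.getD p 0
          · simp only [hqr, if_true]
            refine ⟨hnew, ?_⟩
            intro w hw
            rcases (RowS_succ m n cur p w).mp hw with h | ⟨c', hc', hv, hlt⟩
            · have := ih.2 w h; omega
            · rw [hc] at hc'; injection hc' with h'; omega
          · simp only [hqr, if_false]
            refine ⟨(RowS_succ m n cur p q).mpr (Or.inl ih.1), ?_⟩
            intro w hw
            rcases (RowS_succ m n cur p w).mp hw with h | ⟨c', hc', hv, hlt⟩
            · exact ih.2 w h
            · rw [hc] at hc'; injection hc' with h'; omega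


-- ---- the level invariant ----

-- the sums s = lily + energy of the states reachable in t jumps at lily j
def LevS (m : List Int) (t : ℕ) (j : Nat) (s : Int) : Prop :=
  FPath m t (0, 0) ((j : Int), s - (j : Int))

def Good (m : List Int) (t : ℕ) (cur : List (Option Int)) : Prop :=
  cur.length = m.length ∧
    ∀ j < m.length, IsMaxOpt (LevS m t j) (cur.getD j none)

theorem path_zero_elim {m : List Int} {x y : Int × Int} (hp : FPath m 0 x y) : x = y := by
  cases hp; rfl

theorem hit_iff_sol (m : List Int) (t : ℕ) (cur : List (Option Int))
    (hg : Good m t cur) (hne : ∀ t' ≤ t, ¬ Sol m (0, 0) t') :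
    hitFn m m.length cur m.length = true ↔ Sol m (0, 0) (t+1) := by
  rw [hitFn_iff]
  constructor
  · rintro ⟨j, hj, c, hc, hle⟩
    have hmax := hg.2 j hj
    rw [hc] at hmax
    obtain ⟨hpath, -⟩ := hmax
    have hpath' : FPath m t (0, 0) ((j : Int), c - (j : Int)) := hpath
    have hnn := path_nonneg (by simp) (by simp) hpath'
    simp only at hnn
    have hcn : c < (m.length : Int) := by
      by_contra hge
      exact hne t (le_refl t) ⟨((j : Int), c - (j : Int)), hpath', by simp; omega⟩
    have hstep : FStep m ((j : Int), c - (j : Int)) (c + m.getD j 0, 0) := by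
      refine ⟨by simp; omega, ?_, by simp, ?_⟩
      · simp only
        have : ((j : Int)) < (m.length : Int) := by exact_mod_cast hj
        omega
      · show c + m.getD j 0 + 0 = (j : Int) + (c - (j : Int)) + PySem.List.pyGetD m (j : Int) 0
        rw [PySem.List.pyGetD_natCast]; ring
    refine ⟨(c + m.getD j 0, 0), path_snoc hpath' hstep, ?_⟩
    show (m.length : Int) ≤ c + m.getD j 0 + 0
    omega
  · rintro ⟨y, hp, hesc⟩
    obtain ⟨w, hw, hs⟩ := path_succ_elim hp
    have hnn := path_nonneg (by simp) (by simp) hw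
    have h1 := hs.1
    have h4 := hs.2.2.2
    set j := w.1.toNat with hjdef
    have hjw : (j : Int) = w.1 := by omega
    have hjlt : j < m.length := by omega
    have hlev : LevS m t j (w.1 + w.2) := by
      unfold LevS
      rw [hjw]
      have : w.1 + w.2 - w.1 = w.2 := by ring
      rw [this]
      exact hw
    have hmax := hg.2 j hjlt
    cases hcur : cur.getD j none with
    | none => rw [hcur] at hmax; exact absurd hlev (hmax _)
    | some c =>
      rw [hcur] at hmax
      have hle := hmax.2 _ hlev
      have hget : PySem.List.pyGetD m w.1 0 = m.getD j 0 := by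
        rw [← hjw]; exact PySem.List.pyGetD_natCast m j 0
      refine ⟨j, hjlt, c, hcur, ?_⟩
      rw [hget] at h4
      omega


theorem good_step (m : List Int) (t : ℕ) (cur : List (Option Int))
    (hg : Good m t cur) (hne : ∀ t' ≤ t, ¬ Sol m (0, 0) t')
    (hhit : hitFn m m.length cur m.length = false) :
    Good m (t+1) ((List.range m.length).map (entryFn m m.length cur)) := by
  have hnohit : ∀ j < m.length, ∀ c, cur.getD j none = some c →
      c + m.getD j 0 < (m.length : Int) := by
    intro j hj c hc
    by_contra hge
    rw [← Bool.not_eq_true, hitFn_iff] at hhit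
    exact hhit ⟨j, hj, c, hc, by omega⟩
  -- (i) every candidate reach v ≥ j' is attained at level t+1
  have hfwd : ∀ (j' : ℕ), j' < m.length → ∀ v, RowS m m.length cur j' v → (j' : Int) ≤ v →
      LevS m (t+1) j' v := by
    rintro j' hj' v ⟨j, hj, c, hc, hv, hvn⟩ hjv
    have hmax := hg.2 j (lt_trans hj hj')
    rw [hc] at hmax
    have hpath : FPath m t (0, 0) ((j : Int), c - (j : Int)) := hmax.1
    have hnn := path_nonneg (by simp) (by simp) hpath
    simp only at hnn
    have hcn : c < (m.length : Int) := by
      by_contra hge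
      exact hne t (le_refl t) ⟨((j : Int), c - (j : Int)), hpath, by simp; omega⟩
    have hstep : FStep m ((j : Int), c - (j : Int)) ((j' : Int), v - (j' : Int)) := by
      refine ⟨by simp; omega, by simp; exact_mod_cast hj, by simp; omega, ?_⟩
      show (j' : Int) + (v - (j' : Int)) = (j : Int) + (c - (j : Int)) + PySem.List.pyGetD m (j : Int) 0
      rw [PySem.List.pyGetD_natCast]
      omega
    exact path_snoc hpath hstep
  -- (ii) every level-(t+1) sum w at j' is dominated by a candidate reach
  have hbwd : ∀ (j' : ℕ), j' < m.length → ∀ w, LevS m (t+1) j' w →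
      (j' : Int) ≤ w ∧ ∃ v, RowS m m.length cur j' v ∧ w ≤ v := by
    intro j' hj' w hlev
    obtain ⟨u, hu, hs⟩ := path_succ_elim hlev
    have hnn := path_nonneg (by simp) (by simp) hu
    have h1 := hs.1
    have h2 := hs.2.1
    have h3 := hs.2.2.1
    have h4 := hs.2.2.2
    simp only at h1 h2 h3 h4
    set j := u.1.toNat with hjdef
    have hjw : (j : Int) = u.1 := by omega
    have hjj' : j < j' := by
      have : u.1 < (j' : Int) := h2
      omega
    have hlev' : LevS m t j (u.1 + u.2) := by
      unfold LevS
      rw [hjw]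
      have : u.1 + u.2 - u.1 = u.2 := by ring
      rw [this]
      exact hu
    have hmax := hg.2 j (lt_trans hjj' hj')
    cases hcur : cur.getD j none with
    | none => rw [hcur] at hmax; exact absurd hlev' (hmax _)
    | some c =>
      rw [hcur] at hmax
      have hle := hmax.2 _ hlev'
      have hget : PySem.List.pyGetD m u.1 0 = m.getD j 0 := by
        rw [← hjw]; exact PySem.List.pyGetD_natCast m j 0
      rw [hget] at h4
      have hvn := hnohit j (lt_trans hjj' hj') c hcur
      exact ⟨by omega, c + m.getD j 0, ⟨j, hjj', c, hcur, rfl, hvn⟩, by omega⟩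
  constructor
  · simp
  · intro j' hj'
    have hentry : ((List.range m.length).map (entryFn m m.length cur)).getD j' none =
        entryFn m m.length cur j' := by
      rw [List.getD_eq_getElem?_getD, List.getElem?_map, List.getElem?_range hj']
      rfl
    rw [hentry]
    have hpref := prefFn_spec m m.length cur j'
    unfold entryFn
    cases hq : prefFn m m.length cur j' with
    | none =>
      rw [hq] at hpref
      intro w hw
      obtain ⟨-, v, hv, -⟩ := hbwd j' hj' w hw
      exact hpref v hv
    | some q =>
      rw [hq] at hpref
      by_cases hqj : (j' : Int) ≤ q
      · simp only [hqj, if_true]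
        refine ⟨hfwd j' hj' q hpref.1 hqj, ?_⟩
        intro w hw
        obtain ⟨-, v, hv, hwv⟩ := hbwd j' hj' w hw
        have := hpref.2 v hv
        omega
      · simp only [hqj, if_false]
        intro w hw
        obtain ⟨hjw, v, hv, hwv⟩ := hbwd j' hj' w hw
        have := hpref.2 v hv
        omega


theorem zloop_eq (m : List Int) (tstar : ℕ)
    (hsol : Sol m (0, 0) tstar) (hleast : ∀ t' < tstar, ¬ Sol m (0, 0) t') :
    ∀ (fuel t : ℕ) (cur : List (Option Int)), Good m t cur →
      (∀ t' ≤ t, ¬ Sol m (0, 0) t') → t < tstar → tstar ≤ t + fuel →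
      zloop m m.length fuel (t : Int) cur = (tstar : Int) := by
  intro fuel
  induction fuel with
  | zero => intro t cur _ _ h1 h2; omega
  | succ fuel ih =>
    intro t cur hg hne ht1 ht2
    rw [zloop]
    simp only [brow_eq]
    cases hhit : hitFn m m.length cur m.length with
    | true =>
      show (t : Int) + 1 = (tstar : Int)
      have hsolt1 := (hit_iff_sol m t cur hg hne).mp hhit
      have : ¬ (t + 1 < tstar) := fun hlt => hleast (t+1) hlt hsolt1
      have : tstar = t + 1 := by omega
      rw [this]
      push_cast
      ring
    | false =>
      show zloop m m.length fuel ((t : Int) + 1) ((List.range m.length).map (entryFn m m.length cur)) = (tstar : Int)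
      have hnsol : ¬ Sol m (0, 0) (t+1) := fun hs =>
        by rw [(hit_iff_sol m t cur hg hne).mpr hs] at hhit; exact Bool.noConfusion hhit
      have hne' : ∀ t' ≤ t + 1, ¬ Sol m (0, 0) t' := by
        intro t' ht'
        rcases Nat.lt_succ_iff_lt_or_eq.mp (Nat.lt_succ_of_le ht') with h | rfl
        · exact hne t' (by omega)
        · exact hnsol
      have htne : tstar ≠ t + 1 := fun h => hnsol (h ▸ hsol)
      have : ((t : Int) + 1) = ((t + 1 : ℕ) : Int) := by push_cast; ring
      rw [this]
      exact ih (t+1) _ (good_step m t cur hg hne hhit) hne' (by omega) (by omega)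


-- any escape needs at most n jumps
theorem sol_le_n (m : List Int) (t : ℕ) (h : Sol m (0, 0) t) : t ≤ m.length := by
  cases t with
  | zero => omega
  | succ t' =>
    obtain ⟨y, hp, hesc⟩ := h
    obtain ⟨w, hw, hs⟩ := path_succ_elim hp
    have hlen := path_len hw
    have hnn := path_nonneg (by simp) (by simp) hw
    have h1 := hs.1
    simp only at hlen hnn h1
    omega


-- ===== VERDICT (by name: the statement is the Claim_ definition above) =====
theorem zabica_spec : Claim_equal_zabica := by
  intro m _ hpre
  unfold Spec_zabica
  by_cases hm0 : m.length = 0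
  · obtain rfl : m = [] := List.eq_nil_of_length_eq_zero hm0
    decide
  · have hn : 0 < m.length := by omega
    obtain ⟨hA0, hAsol, hAlow⟩ :=
      pomozna_spec m hpre (m.length + 1) 0 0 (le_refl 0) (le_refl 0)
        ⟨0, FPath.refl _⟩ (by omega)
    set P := pomozna m (m.length : Int) (m.length + 1) 0 0 with hP
    have hleast : ∀ t' < P.toNat, ¬ Sol m (0, 0) t' := by
      intro t' ht' hs
      have := hAlow t' hs
      omega
    have hgood : Good m 0 (some 0 :: List.replicate (m.length - 1) none) := by
      constructor
      · simp
        omega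
      · intro j hj
        cases j with
        | zero =>
          show IsMaxOpt (LevS m 0 0) (some 0)
          constructor
          · show FPath m 0 (0, 0) (((0:ℕ) : Int), 0 - ((0:ℕ) : Int))
            norm_num
            exact FPath.refl _
          · intro w hw
            have := path_zero_elim hw
            rw [Prod.mk.injEq] at this
            push_cast at this
            omega
        | succ j' =>
          have hnone : (some (0:Int) :: List.replicate (m.length - 1) none).getD (j'+1) none
              = none := by
            rw [List.getD_cons_succ]
            exact List.getD_replicate none (by omega)
          have hgen : ∀ (o : Option Int), o = none → (∀ w, ¬ LevS m 0 (j'+1) w) →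
              IsMaxOpt (LevS m 0 (j'+1)) o := by
            rintro o rfl h
            exact h
          apply hgen _ hnone
          intro w hw
          have := path_zero_elim hw
          rw [Prod.mk.injEq] at this
          push_cast at this
          omega
    have hne0 : ∀ t' ≤ 0, ¬ Sol m (0, 0) t' := by
      intro t' ht' hs
      have ht0 : t' = 0 := by omega
      subst ht0
      obtain ⟨y, hp, hesc⟩ := hs
      rw [← path_zero_elim hp] at hesc
      exact absurd hesc (show ¬ ((m.length : Int) ≤ 0 + 0) by omega)
    have htpos : 0 < P.toNat := by
      rcases Nat.eq_zero_or_pos P.toNat with h | h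
      · exact absurd (h ▸ hAsol) (hne0 0 (le_refl 0))
      · exact h
    have hble := sol_le_n m P.toNat hAsol
    have hB := zloop_eq m P.toNat hAsol hleast m.length 0
      (some 0 :: List.replicate (m.length - 1) none) hgood hne0 (by omega) (by omega)
    norm_num at hB
    show P = zabica_alt m
    rw [zabica_alt]
    rw [if_neg (by omega)]
    rw [hB]
    omega
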